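-- pv_equiv track=rewrite | github.com/badzil/adventofcode | day_09_part_1.py | get_total_score
-- ===== SOURCE A (Python) =====
-- def get_total_score(stream):
--     score = 0
--     current_level = 0
--     ignore_next_character = False
--     garbage = False
--
--     for char in stream:
--         if ignore_next_character:
--             ignore_next_character = False
--         elif char == '!':
--             ignore_next_character = True
--         elif char == '<':
--             garbage = True
--         elif garbage:
--             if char == '>':
--                 garbage = False
--         elif char == '{':
--             current_level += 1
--         elif char == '}':
--             score += current_level
--             current_level -= 1
--
--     return score
-- ===== SOURCE B (Python) =====
-- def get_total_score(stream):
--     score = 0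
--     level = 0
--     it = iter(stream)
--     for char in it:
--         if char == '{':
--             level += 1
--         elif char == '}':
--             score += level
--             level -= 1
--         elif char == '!':
--             next(it, None)
--         elif char == '<':
--             while True:
--                 c = next(it, None)
--                 if c is None or c == '>':
--                     break
--                 if c == '!':
--                     next(it, None)
--     return score
-- ===== Notes on version B (the rewrite author's own statement) =====
-- stated objective: alternative
-- what changed: Replaces the four boolean state flags with nested control structure: an explicit iterator is consumed by an outer loop, the escape character discards one following char directly, and a garbage opener delegates to an inner loop that consumes (escape-aware) until the garbage closer or end of input.
import Mathlib
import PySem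

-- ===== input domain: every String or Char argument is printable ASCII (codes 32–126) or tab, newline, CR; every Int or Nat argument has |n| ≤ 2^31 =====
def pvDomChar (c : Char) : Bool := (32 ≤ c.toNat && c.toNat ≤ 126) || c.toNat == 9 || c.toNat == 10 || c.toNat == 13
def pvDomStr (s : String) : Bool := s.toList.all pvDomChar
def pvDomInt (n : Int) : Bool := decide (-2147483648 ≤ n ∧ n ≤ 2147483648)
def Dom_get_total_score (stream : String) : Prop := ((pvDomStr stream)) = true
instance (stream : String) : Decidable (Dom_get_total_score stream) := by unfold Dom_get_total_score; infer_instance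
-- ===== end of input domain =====

-- B replaces A's four boolean state flags by nested loop structure (an outer loop plus an inner garbage-consuming loop); alternative decomposition, same cost.


-- ===== PORT A =====
-- state = (score, current_level, ignore_next_character, garbage)
def stepA (st : Int × Int × Bool × Bool) (char : Char) : Int × Int × Bool × Bool :=
  match st with
  | (score, level, ign, gar) =>
    if ign then (score, level, false, gar)
    else if char = '!' then (score, level, true, gar)
    else if char = '<' then (score, level, ign, true)
    else if gar then (if char = '>' then (score, level, ign, false) else (score, level, ign, gar))
    else if char = '{' then (score, level + 1, ign, gar)
    else if char = '}' then (score + level, level - 1, ign, gar)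
    else (score, level, ign, gar)

def get_total_score (stream : String) : Int :=
  (stream.toList.foldl stepA (0, 0, false, false)).1

-- ===== PORT B =====
-- inner while-loop: consume garbage (honouring the escape char) until the closer or end of input; returns the rest
def skipGarbage : List Char → List Char
  | [] => []
  | c :: rest =>
    if c = '>' then rest
    else if c = '!' then skipGarbage rest.tail
    else skipGarbage rest
termination_by l => l.length
decreasing_by
  all_goals simp [List.length_tail] <;> omega

theorem skipGarbage_length_le (l : List Char) : (skipGarbage l).length ≤ l.length := by
  fun_induction skipGarbage l <;> simp_all [List.length_tail] <;> omega

-- outer loop over the iterator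
def goAlt (score level : Int) : List Char → Int
  | [] => score
  | c :: rest =>
    if c = '{' then goAlt score (level + 1) rest
    else if c = '}' then goAlt (score + level) (level - 1) rest
    else if c = '!' then goAlt score level rest.tail
    else if c = '<' then goAlt score level (skipGarbage rest)
    else goAlt score level rest
termination_by l => l.length
decreasing_by
  all_goals have := skipGarbage_length_le rest
  all_goals simp [List.length_tail] <;> omega

def get_total_score_alt (stream : String) : Int :=
  goAlt 0 0 stream.toList

-- ===== PRECONDITION & SPEC =====
def Spec_get_total_score (stream : String) (out : Int) : Prop := out = get_total_score_alt stream
instance (stream : String) (out : Int) : Decidable (Spec_get_total_score stream out) := by unfold Spec_get_total_score; infer_instance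

-- ===== CLAIM (what is proved, stated in full; the proofs are below) =====
def Claim_equal_get_total_score : Prop := ∀ (stream : String), Dom_get_total_score stream → Spec_get_total_score stream (get_total_score stream)

-- ===== LEMMAS AND PROOFS =====
theorem skipGarbage_cons (c : Char) (rest : List Char) :
    skipGarbage (c :: rest) =
      if c = '>' then rest
      else if c = '!' then skipGarbage rest.tail
      else skipGarbage rest := by
  rw [skipGarbage.eq_def]

theorem main_inv (n : Nat) : ∀ l : List Char, l.length ≤ n →
    (∀ score level : Int, (List.foldl stepA (score, level, false, false) l).1 = goAlt score level l) ∧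
    (∀ score level : Int, (List.foldl stepA (score, level, false, true) l).1 = goAlt score level (skipGarbage l)) := by
  induction n with
  | zero =>
    intro l hl
    have : l = [] := List.eq_nil_of_length_eq_zero (Nat.le_zero.mp hl)
    subst this
    constructor <;> intro score level <;> simp [goAlt, skipGarbage]
  | succ n ih =>
    intro l hl
    cases l with
    | nil => constructor <;> intro score level <;> simp [goAlt, skipGarbage]
    | cons c rest =>
      have hrest : rest.length ≤ n := by simpa using Nat.succ_le_succ_iff.mp hl
      constructor
      · intro score level
        by_cases h1 : c = '!'
        · subst h1
          simp only [List.foldl_cons, stepA, if_neg Bool.false_ne_true, if_pos rfl]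
          rw [goAlt]
          simp only [if_neg (by decide : ¬ ('!' : Char) = '{'), if_neg (by decide : ¬ ('!' : Char) = '}'), if_pos rfl]
          cases rest with
          | nil => simp [goAlt]
          | cons d rest' =>
            simp only [List.foldl_cons, stepA, if_pos rfl, List.tail_cons]
            exact (ih rest' (by simp at hrest; omega)).1 score level
        · by_cases h2 : c = '<'
          · subst h2
            simp only [List.foldl_cons, stepA, if_neg Bool.false_ne_true,
              if_neg (by decide : ¬ ('<' : Char) = '!'), if_pos rfl]
            rw [goAlt]
            simp only [if_neg (by decide : ¬ ('<' : Char) = '{'), if_neg (by decide : ¬ ('<' : Char) = '}'),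
              if_neg (by decide : ¬ ('<' : Char) = '!'), if_pos rfl]
            exact (ih rest hrest).2 score level
          · by_cases h3 : c = '{'
            · subst h3
              simp only [List.foldl_cons, stepA, if_neg Bool.false_ne_true,
                if_neg (by decide : ¬ ('{' : Char) = '!'), if_neg (by decide : ¬ ('{' : Char) = '<'),
                if_neg Bool.false_ne_true, if_pos rfl]
              rw [goAlt]
              simp only [if_pos rfl]
              exact (ih rest hrest).1 score (level + 1)
            · by_cases h4 : c = '}'
              · subst h4
                simp only [List.foldl_cons, stepA, if_neg Bool.false_ne_true,
                  if_neg (by decide : ¬ ('}' : Char) = '!'), if_neg (by decide : ¬ ('}' : Char) = '<'),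
                  if_neg Bool.false_ne_true, if_neg (by decide : ¬ ('}' : Char) = '{'), if_pos rfl]
                rw [goAlt]
                simp only [if_neg (by decide : ¬ ('}' : Char) = '{'), if_pos rfl]
                exact (ih rest hrest).1 (score + level) (level - 1)
              · simp only [List.foldl_cons, stepA, if_neg Bool.false_ne_true, if_neg h1, if_neg h2,
                  if_neg h3, if_neg h4]
                rw [goAlt]
                simp only [if_neg h3, if_neg h4, if_neg h1, if_neg h2]
                exact (ih rest hrest).1 score level
      · intro score level
        by_cases h1 : c = '!'
        · subst h1
          simp only [List.foldl_cons, stepA, if_neg Bool.false_ne_true, if_pos rfl]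
          rw [skipGarbage_cons]
          simp only [if_neg (by decide : ¬ ('!' : Char) = '>'), if_pos rfl]
          cases rest with
          | nil => simp [goAlt, skipGarbage]
          | cons d rest' =>
            simp only [List.foldl_cons, stepA, if_pos rfl]
            exact (ih rest' (by simp at hrest; omega)).2 score level
        · by_cases h2 : c = '<'
          · subst h2
            simp only [List.foldl_cons, stepA, if_neg Bool.false_ne_true,
              if_neg (by decide : ¬ ('<' : Char) = '!'), if_pos rfl]
            rw [skipGarbage_cons]
            simp only [if_neg (by decide : ¬ ('<' : Char) = '>'), if_neg (by decide : ¬ ('<' : Char) = '!')]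
            exact (ih rest hrest).2 score level
          · by_cases h3 : c = '>'
            · subst h3
              simp only [List.foldl_cons, stepA, if_neg Bool.false_ne_true,
                if_neg (by decide : ¬ ('>' : Char) = '!'), if_neg (by decide : ¬ ('>' : Char) = '<'),
                if_pos rfl]
              rw [skipGarbage_cons]
              simp only [if_pos rfl]
              exact (ih rest hrest).1 score level
            · simp only [List.foldl_cons, stepA, if_neg Bool.false_ne_true, if_neg h1, if_neg h2,
                if_pos rfl, if_neg h3]
              rw [skipGarbage_cons]
              simp only [if_neg h3, if_neg h1]
              exact (ih rest hrest).2 score level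

-- ===== VERDICT (by name: the statement is the Claim_ definition above) =====
theorem get_total_score_spec : Claim_equal_get_total_score := by
  intro stream _
  unfold Spec_get_total_score get_total_score get_total_score_alt
  exact (main_inv stream.toList.length stream.toList le_rfl).1 0 0
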